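-- pv_equiv track=rewrite | github.com/vapordude/DeepAgent-scar | py_src/evaluate/evaluate_restbench.py | _endpoint_to_dynamic_tool_name
-- ===== SOURCE A (Python) =====
-- def _endpoint_to_dynamic_tool_name(endpoint: str) -> str:
--     """
--     Convert a standard endpoint format (e.g., 'GET /users/{user_id}/playlists')
--     to the dynamic tool name used by the agent (e.g., 'post_users_user_id_playlists').
--
--     The transformation mirrors RestBenchAPITools._normalize_endpoint_name:
--     - Lowercase the full string
--     - Remove curly braces around path params
--     - Replace spaces and '/' with '_'
--     - Collapse duplicate underscores
--     - Ensure result starts with a letter (prefix 'rb_' if needed)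
--     """
--     if not endpoint:
--         return ""
--     name = endpoint.strip().lower()
--     # Remove braces
--     name = name.replace('{', '').replace('}', '')
--     # Replace spaces and slashes with underscores
--     name = name.replace(' ', '_').replace('/', '_')
--     # Collapse duplicate underscores
--     while '__' in name:
--         name = name.replace('__', '_')
--     # Ensure starts with a letter
--     if name and not name[0].isalpha():
--         name = 'rb_' + name
--     return name
-- ===== SOURCE B (Python) =====
-- def _endpoint_to_dynamic_tool_name(endpoint: str) -> str:
--     """Build the tool name in one forward pass: drop braces, turn every run of
--     spaces/slashes/underscores into a single underscore, then guard the first char."""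
--     if not endpoint:
--         return ""
--     chars = []
--     prev_sep = False
--     for ch in endpoint.strip().lower():
--         if ch in '{}':
--             continue
--         if ch in ' /_':
--             if not prev_sep:
--                 chars.append('_')
--             prev_sep = True
--         else:
--             chars.append(ch)
--             prev_sep = False
--     name = ''.join(chars)
--     if name and not name[0].isalpha():
--         name = 'rb_' + name
--     return name
-- ===== Notes on version B (the rewrite author's own statement) =====
-- stated objective: alternative
-- what changed: Replaces A's staged string rewrites (four replace passes plus a 'while __ in name' rescan-and-replace loop) by a single forward character pass with a last-was-separator flag that drops braces and collapses separator runs as it goes.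
import Mathlib
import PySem

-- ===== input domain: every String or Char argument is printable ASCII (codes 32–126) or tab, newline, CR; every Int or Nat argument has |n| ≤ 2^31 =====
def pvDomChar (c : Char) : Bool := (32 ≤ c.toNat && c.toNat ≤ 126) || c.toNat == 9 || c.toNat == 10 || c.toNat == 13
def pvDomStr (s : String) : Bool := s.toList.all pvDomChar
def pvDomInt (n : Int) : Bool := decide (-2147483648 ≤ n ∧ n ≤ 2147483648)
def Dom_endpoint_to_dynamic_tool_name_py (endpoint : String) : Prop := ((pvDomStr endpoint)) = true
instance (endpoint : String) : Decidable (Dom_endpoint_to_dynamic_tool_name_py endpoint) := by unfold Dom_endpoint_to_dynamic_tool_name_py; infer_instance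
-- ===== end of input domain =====

-- B replaces A's staged replace passes and the `while '__' in name` rescan loop by one
-- forward pass with a last-was-separator flag; same return value, no speed claim.

-- ===== PORT A =====
-- termination helpers for the `while '__' in name` loop (cited by collapseA's decreasing_by)
def pvHalve : List Char → List Char
  | [] => []
  | [c] => [c]
  | c :: d :: t => if c = '_' ∧ d = '_' then '_' :: pvHalve t else c :: pvHalve (d :: t)

theorem pv_goDD (fuel : Nat) (l acc : List Char) (h : l.length ≤ fuel) :
    PySem.Chars.replace.go ['_','_'] ['_'] fuel l acc = acc.reverse ++ pvHalve l := by
  induction fuel generalizing l acc with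
  | zero =>
    interval_cases hl : l.length
    · simp at hl; subst hl; simp [PySem.Chars.replace.go, pvHalve]
  | succ n ih =>
    match l with
    | [] => simp [PySem.Chars.replace.go, pvHalve]
    | [c] =>
      simp only [PySem.Chars.replace.go]
      have : (['_','_'].isPrefixOf [c]) = false := by
        simp [List.isPrefixOf]
      rw [this]
      simp only [Bool.false_eq_true, if_false]
      rw [ih [] (c :: acc) (by simp)]
      simp [pvHalve]
    | c :: d :: t =>
      simp only [PySem.Chars.replace.go]
      by_cases hdd : c = '_' ∧ d = '_'
      · obtain ⟨hc, hd⟩ := hdd; subst hc; subst hd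
        have : (['_','_'].isPrefixOf ('_' :: '_' :: t)) = true := by
          simp [List.isPrefixOf]
        rw [this]
        simp only [if_true]
        rw [ih _ _ (by simp at h ⊢; omega)]
        simp [pvHalve]
      · have : (['_','_'].isPrefixOf (c :: d :: t)) = false := by
          simp [List.isPrefixOf]
          intro hc hd; exact absurd ⟨hc.symm, hd.symm⟩ hdd
        rw [this]
        simp only [Bool.false_eq_true, if_false]
        rw [ih _ _ (by simp at h ⊢; omega)]
        simp [pvHalve, hdd]

theorem pv_replace_dd (l : List Char) :
    PySem.Chars.replace l ['_','_'] ['_'] = pvHalve l := by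
  rw [PySem.Chars.replace]
  simp only [List.isEmpty_cons, Bool.false_eq_true, if_false]
  rw [pv_goDD l.length l [] le_rfl]; simp

theorem pvHalve_len_le (l : List Char) : (pvHalve l).length ≤ l.length := by
  fun_induction pvHalve l with
  | case1 => simp
  | case2 c => simp
  | case3 c d t h ih => simp at ih ⊢; omega
  | case4 c d t h ih => simp at ih ⊢; omega

theorem pvHalve_len_lt (l : List Char) (h : ['_','_'] <:+: l) :
    (pvHalve l).length < l.length := by
  fun_induction pvHalve l with
  | case1 => simp at h
  | case2 c =>
    exfalso
    have := h.length_le; simp at this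
  | case3 c d t hdd ih =>
    have := pvHalve_len_le t
    simp; omega
  | case4 c d t hdd ih =>
    rw [List.infix_cons_iff] at h
    rcases h with h | h
    · exfalso
      rcases h with ⟨t', ht'⟩
      simp at ht'
      exact hdd ⟨ht'.1.symm, ht'.2.1.symm⟩
    · have := ih h
      simp at this ⊢; omega

def collapseA (l : List Char) : List Char :=
  if PySem.Chars.isIn ['_','_'] l then collapseA (PySem.Chars.replace l ['_','_'] ['_']) else l
termination_by l.length
decreasing_by
  rename_i h
  rw [pv_replace_dd]
  exact pvHalve_len_lt l ((PySem.Chars.isIn_iff_infix _ _).mp h)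

def endpoint_to_dynamic_tool_name_py (endpoint : String) : String :=
  if endpoint.toList = [] then ""
  else
    let name := PySem.Chars.lower (PySem.Chars.strip endpoint.toList)
    let name := PySem.Chars.replace (PySem.Chars.replace name ['{'] []) ['}'] []
    let name := PySem.Chars.replace (PySem.Chars.replace name [' '] ['_']) ['/'] ['_']
    let name := collapseA name
    let name := match name with
      | [] => name
      | c :: _ => if ¬ PySem.Chars.isalpha c then ['r','b','_'] ++ name else name
    String.ofList name

-- ===== PORT B =====
def endpoint_to_dynamic_tool_name_py_alt (endpoint : String) : String :=
  if endpoint.toList = [] then ""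
  else
    let st := (PySem.Chars.lower (PySem.Chars.strip endpoint.toList)).foldl
      (fun (s : List Char × Bool) ch =>
        if ch = '{' ∨ ch = '}' then s
        else if ch = ' ' ∨ ch = '/' ∨ ch = '_' then
          (if s.2 then s.1 else s.1 ++ ['_'], true)
        else (s.1 ++ [ch], false)) ([], false)
    let name := st.1
    let name := match name with
      | [] => name
      | c :: _ => if ¬ PySem.Chars.isalpha c then ['r','b','_'] ++ name else name
    String.ofList name

-- ===== PRECONDITION & SPEC =====
def Spec_endpoint_to_dynamic_tool_name_py (endpoint : String) (out : String) : Prop := out = endpoint_to_dynamic_tool_name_py_alt endpoint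
instance (endpoint : String) (out : String) : Decidable (Spec_endpoint_to_dynamic_tool_name_py endpoint out) := by unfold Spec_endpoint_to_dynamic_tool_name_py; infer_instance

-- ===== CLAIM (what is proved, stated in full; the proofs are below) =====
def Claim_equal_endpoint_to_dynamic_tool_name_py : Prop := ∀ (endpoint : String), Dom_endpoint_to_dynamic_tool_name_py endpoint → Spec_endpoint_to_dynamic_tool_name_py endpoint (endpoint_to_dynamic_tool_name_py endpoint)

-- ===== LEMMAS AND PROOFS =====

-- collapse runs of '_' to a single '_' (prev = "last emitted char was '_'")
def sqF : Bool → List Char → List Char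
  | _, [] => []
  | prev, c :: cs =>
    if c = '_' then (if prev then sqF true cs else '_' :: sqF true cs)
    else c :: sqF false cs

-- what B's loop body computes, written as structural recursion
def bpass : List Char → Bool → List Char
  | [], _ => []
  | c :: cs, prev =>
    if c = '{' ∨ c = '}' then bpass cs prev
    else if c = ' ' ∨ c = '/' ∨ c = '_' then
      (if prev then bpass cs true else '_' :: bpass cs true)
    else c :: bpass cs false

theorem sqF_halve (l : List Char) (prev : Bool) : sqF prev (pvHalve l) = sqF prev l := by
  fun_induction pvHalve l generalizing prev with
  | case1 => rfl
  | case2 c => rfl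
  | case3 c d t hdd ih =>
    obtain ⟨hc, hd⟩ := hdd; subst hc; subst hd
    cases prev <;> simp [sqF, ih]
  | case4 c d t hdd ih =>
    by_cases hc : c = '_'
    · subst hc
      cases prev <;> simp [sqF, ih]
    · simp [sqF, hc, ih]

theorem sqF_no_dd (l : List Char) (h : ¬ (['_','_'] <:+: l)) :
    sqF false l = l ∧ (l.head? ≠ some '_' → sqF true l = l) := by
  induction l with
  | nil => simp [sqF]
  | cons c cs ih =>
    rw [List.infix_cons_iff] at h
    push Not at h
    obtain ⟨hpre, hinf⟩ := h
    obtain ⟨ih1, ih2⟩ := ih hinf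
    by_cases hc : c = '_'
    · subst hc
      have hcs : cs.head? ≠ some '_' := by
        intro hh
        cases cs with
        | nil => simp at hh
        | cons d t =>
          simp at hh
          subst hh
          exact hpre ⟨t, rfl⟩
      constructor
      · simp [sqF, ih2 hcs]
      · simp
    · constructor
      · simp [sqF, hc, ih1]
      · intro _; simp [sqF, hc, ih1]

theorem collapseA_eq_sqF (l : List Char) : collapseA l = sqF false l := by
  fun_induction collapseA l with
  | case1 l h ih =>
    rw [pv_replace_dd] at ih
    rw [pv_replace_dd, ih, sqF_halve]
  | case2 l h =>
    have hninf : ¬ (['_','_'] <:+: l) := by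
      rw [← PySem.Chars.isIn_iff_infix]; exact h
    exact (sqF_no_dd l hninf).1.symm

theorem replace_single (l : List Char) (c : Char) (new : List Char) :
    PySem.Chars.replace l [c] new = l.flatMap (fun x => if x = c then new else [x]) := by
  rw [PySem.Chars.replace]
  simp only [List.isEmpty_cons, Bool.false_eq_true, if_false]
  suffices h : ∀ fuel m acc, m.length ≤ fuel →
      PySem.Chars.replace.go [c] new fuel m acc
        = acc.reverse ++ m.flatMap (fun x => if x = c then new else [x]) by
    rw [h l.length l [] le_rfl]; simp
  intro fuel
  induction fuel with
  | zero =>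
    intro m acc hm
    interval_cases hl : m.length
    · simp at hl; subst hl; simp [PySem.Chars.replace.go]
  | succ n ih =>
    intro m acc hm
    match m with
    | [] => simp [PySem.Chars.replace.go]
    | x :: t =>
      simp only [PySem.Chars.replace.go]
      by_cases hx : x = c
      · subst hx
        have : ([x].isPrefixOf (x :: t)) = true := by simp [List.isPrefixOf]
        rw [this]
        simp only [if_true, List.length_cons, List.length_nil, List.drop_succ_cons, List.drop_zero]
        rw [ih t _ (by simp at hm; omega)]
        simp
      · have : ([c].isPrefixOf (x :: t)) = false := by
          simp [List.isPrefixOf]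
          exact fun hh => hx hh.symm
        rw [this]
        simp only [Bool.false_eq_true, if_false]
        rw [ih t _ (by simp at hm; omega)]
        simp [hx]

theorem sqF_chain (l : List Char) (prev : Bool) :
    sqF prev (((((l.flatMap (fun x => if x = '{' then [] else [x])).flatMap
        (fun x => if x = '}' then [] else [x])).flatMap
        (fun x => if x = ' ' then ['_'] else [x])).flatMap
        (fun x => if x = '/' then ['_'] else [x]))) = bpass l prev := by
  induction l generalizing prev with
  | nil => rfl
  | cons c cs ih =>
    simp only [List.flatMap_cons, List.flatMap_append]
    by_cases h1 : c = '{'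
    · simp [h1, bpass, ih]
    · by_cases h2 : c = '}'
      · simp [h2, bpass, ih]
      · by_cases h3 : c = ' '
        · cases prev <;> simp [h3, bpass, sqF, ih]
        · by_cases h4 : c = '/'
          · cases prev <;> simp [h4, bpass, sqF, ih]
          · by_cases h5 : c = '_'
            · cases prev <;> simp [h5, bpass, sqF, ih]
            · simp [h1, h2, h3, h4, h5, bpass, sqF, ih]

theorem foldl_bpass (cs : List Char) (acc : List Char) (prev : Bool) :
    (cs.foldl (fun (s : List Char × Bool) ch =>
        if ch = '{' ∨ ch = '}' then s
        else if ch = ' ' ∨ ch = '/' ∨ ch = '_' then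
          (if s.2 then s.1 else s.1 ++ ['_'], true)
        else (s.1 ++ [ch], false)) (acc, prev)).1 = acc ++ bpass cs prev := by
  induction cs generalizing acc prev with
  | nil => simp [bpass]
  | cons c cs ih =>
    simp only [List.foldl_cons]
    by_cases h1 : c = '{' ∨ c = '}'
    · simp [h1, bpass, ih]
    · by_cases h2 : c = ' ' ∨ c = '/' ∨ c = '_'
      · push Not at h1
        cases prev <;> simp [h1.1, h1.2, h2, bpass, ih]
      · push Not at h1 h2
        simp [h1.1, h1.2, h2.1, h2.2.1, h2.2.2, bpass, ih]

-- ===== VERDICT (by name: the statement is the Claim_ definition above) =====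
theorem endpoint_to_dynamic_tool_name_py_spec : Claim_equal_endpoint_to_dynamic_tool_name_py := by
  intro endpoint _
  unfold Spec_endpoint_to_dynamic_tool_name_py
  unfold endpoint_to_dynamic_tool_name_py endpoint_to_dynamic_tool_name_py_alt
  by_cases h : endpoint.toList = []
  · simp [h]
  · simp only [h, if_false]
    rw [replace_single, replace_single, replace_single, replace_single,
      collapseA_eq_sqF, sqF_chain, foldl_bpass]
    simp
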